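-- pv_equiv track=rewrite | github.com/galaxyproject/tools-iuc | tools/diamond/test-data/blastdb/taxdb.py | infer_blast_name
-- ===== SOURCE A (Python) =====
-- def infer_blast_name(taxid, parent, lookup):
--     """
--     """
--     seen = set()
--     cur = taxid
--     while True:
--         if cur in seen:
--             return "Unknown"
--         seen.add(cur)
--         name = lookup.get(cur, "").lower()
--
--         if name:
--             return name
--         if cur not in parent:
--             return "Unknown"
--         cur = parent[cur]
-- ===== SOURCE B (Python) =====
-- def infer_blast_name(taxid, parent, lookup):
--     # Floyd's tortoise-and-hare instead of a visited set: O(1) extra space.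
--     # Phase 1 walks a slow and a double-speed fast cursor (no name lookups) to
--     # learn whether the parent chain ends or runs into a cycle; phases 2/3
--     # recover the tail length mu and cycle length lam, so that mu+lam (or
--     # steps+1 for a terminating chain) is exactly the number of distinct nodes
--     # the chain visits; a final single bounded scan checks those nodes' names.
--     slow = fast = taxid
--     steps = 0                  # parent steps taken by the fast cursor
--     cyclic = False
--     while True:
--         if fast not in parent:
--             break              # chain terminates after `steps` edges
--         fast = parent[fast]
--         steps += 1
--         if fast not in parent:
--             break
--         fast = parent[fast]
--         steps += 1
--         slow = parent[slow]
--         if slow == fast: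
--             cyclic = True      # the chain runs into a cycle
--             break
--     if cyclic:
--         # Phase 2: tail length mu (cursors from the start and the meeting point).
--         p, q = taxid, fast
--         mu = 0
--         while p != q:
--             p = parent[p]
--             q = parent[q]
--             mu += 1
--         # Phase 3: cycle length lam.
--         lam = 1
--         q = parent[p]
--         while q != p:
--             q = parent[q]
--             lam += 1
--         total = mu + lam
--     else:
--         total = steps + 1
--     cur = taxid
--     for _ in range(total):
--         name = lookup.get(cur, "").lower()
--         if name:
--             return name
--         cur = parent.get(cur, cur)
--     return "Unknown"
-- ===== Notes on version B (the rewrite author's own statement) =====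
-- stated objective: alternative
-- what changed: The visited-set walk is replaced by Floyd's tortoise-and-hare: two cursors (one single-speed, one double-speed) detect whether the parent chain terminates or cycles, two further pointer walks recover the tail length mu and cycle length lam, and one bounded scan of the first mu+lam (or steps+1) chain nodes yields the first non-empty lowercased name, so no set is ever built (O(1) extra space).
import Mathlib
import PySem

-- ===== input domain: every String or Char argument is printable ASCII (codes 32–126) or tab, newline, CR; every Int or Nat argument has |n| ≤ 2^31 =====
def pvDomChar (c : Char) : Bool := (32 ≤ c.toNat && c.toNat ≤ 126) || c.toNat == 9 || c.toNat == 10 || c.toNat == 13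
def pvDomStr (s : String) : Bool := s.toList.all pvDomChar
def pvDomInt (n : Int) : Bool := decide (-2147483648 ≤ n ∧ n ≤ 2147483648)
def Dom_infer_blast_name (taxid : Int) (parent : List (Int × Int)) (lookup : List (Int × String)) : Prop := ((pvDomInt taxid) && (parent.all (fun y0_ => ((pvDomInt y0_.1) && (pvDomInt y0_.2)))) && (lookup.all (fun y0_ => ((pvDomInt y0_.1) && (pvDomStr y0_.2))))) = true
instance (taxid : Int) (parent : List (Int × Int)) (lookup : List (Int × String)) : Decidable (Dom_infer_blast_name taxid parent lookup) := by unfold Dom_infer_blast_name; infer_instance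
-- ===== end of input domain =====

-- B replaces A's visited-set cycle detection by Floyd's tortoise-and-hare (constant extra
-- space: detect end/cycle with two cursors, recover tail+cycle length, then one bounded
-- name scan); objective: alternative algorithm, return values proved equal on all inputs.

-- ===== PORT A =====

-- monotonicity of the termination measure (cited by aLoop's decreasing_by)
theorem pv_filter_mono (K seen : List Int) (c : Int) :
    (K.filter (fun k => decide (k ∉ seen ++ [c]))).length ≤
      (K.filter (fun k => decide (k ∉ seen))).length := by
  induction K with
  | nil => simp
  | cons a K ih =>
    simp only [List.filter_cons]
    by_cases h2 : a ∈ seen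
    · have d1 : (decide (a ∉ seen ++ [c])) = false := by
        simp [List.mem_append, h2]
      have d2 : (decide (a ∉ seen)) = false := by simp [h2]
      rw [d1, d2]; simpa using ih
    · by_cases h1 : a ∈ seen ++ [c]
      · have d1 : (decide (a ∉ seen ++ [c])) = false := by simp [h1]
        have d2 : (decide (a ∉ seen)) = true := by simp [h2]
        rw [d1, d2]; simp only [Bool.false_eq_true, if_false, if_true, List.length_cons]; omega
      · have d1 : (decide (a ∉ seen ++ [c])) = true := by simp [h1]
        have d2 : (decide (a ∉ seen)) = true := by simp [h2]
        rw [d1, d2]; simp only [Bool.false_eq_true, if_false, if_true, List.length_cons]; omega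

-- strict decrease of the termination measure (cited by aLoop's decreasing_by)
theorem pv_filter_lt (K seen : List Int) (c : Int) (hK : c ∈ K) (hs : c ∉ seen) :
    (K.filter (fun k => decide (k ∉ seen ++ [c]))).length <
      (K.filter (fun k => decide (k ∉ seen))).length := by
  induction K with
  | nil => simp at hK
  | cons a K ih =>
    simp only [List.filter_cons]
    by_cases h3 : a = c
    · subst h3
      have d1 : (decide (a ∉ seen ++ [a])) = false := by simp
      have d2 : (decide (a ∉ seen)) = true := by simp [hs]
      rw [d1, d2]
      have := pv_filter_mono K seen a
      simp only [Bool.false_eq_true, if_false, if_true, List.length_cons]; omega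
    · have hcK : c ∈ K := by
        rcases List.mem_cons.1 hK with h | h
        · exact absurd h.symm h3
        · exact h
      have := ih hcK
      by_cases h2 : a ∈ seen
      · have d1 : (decide (a ∉ seen ++ [c])) = false := by
          simp [List.mem_append, h2]
        have d2 : (decide (a ∉ seen)) = false := by simp [h2]
        rw [d1, d2]; simp only [Bool.false_eq_true, if_false]; omega
      · have d1 : (decide (a ∉ seen ++ [c])) = true := by
          simp [List.mem_append, h2, h3]
        have d2 : (decide (a ∉ seen)) = true := by simp [h2]
        rw [d1, d2]; simp only [Bool.false_eq_true, if_false, if_true, List.length_cons]; omega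

-- the 'while True' loop of A, state = (seen, cur), terminating because seen grows inside parent's keys
def aLoop (parent : PySem.Dict Int Int) (lookup : PySem.Dict Int String)
    (seen : PySem.Set Int) (cur : Int) : String :=
  if hseen : cur ∈ seen then "Unknown"
  else
    let name := PySem.Str.lower (PySem.Dict.getD lookup cur "")
    if name ≠ "" then name
    else if hpar : parent.contains cur = true then
      aLoop parent lookup (PySem.Set.add seen cur) (PySem.Dict.getD parent cur 0)
    else "Unknown"
termination_by (parent.keys.filter (fun k => decide (k ∉ seen))).length
decreasing_by
  have hk : cur ∈ parent.keys := (PySem.Dict.contains_iff_mem_keys parent cur).1 hpar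
  have hadd : PySem.Set.add seen cur = seen ++ [cur] := by
    simp [PySem.Set.add, PySem.Set.contains]
    intro h; exact absurd h hseen
  rw [hadd]
  exact pv_filter_lt _ _ _ hk hseen

def infer_blast_name (taxid : Int) (parent : List (Int × Int)) (lookup : List (Int × String)) : String :=
  aLoop (PySem.Dict.ofList parent) (PySem.Dict.ofList lookup) PySem.Set.empty taxid

-- ===== PORT B =====

-- phase 1 of Source B: the tortoise/hare loop; fuel only makes it total (proved never exhausted)
def floyd1 (P : PySem.Dict Int Int) : Nat → Int → Int → Nat → Option (Bool × Int × Nat)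
  | 0, _, _, _ => none
  | n + 1, slow, fast, steps =>
    if P.contains fast = true then
      if P.contains (PySem.Dict.getD P fast 0) = true then
        if PySem.Dict.getD P slow 0 == PySem.Dict.getD P (PySem.Dict.getD P fast 0) 0 then
          some (true, PySem.Dict.getD P (PySem.Dict.getD P fast 0) 0, steps + 2)
        else floyd1 P n (PySem.Dict.getD P slow 0) (PySem.Dict.getD P (PySem.Dict.getD P fast 0) 0) (steps + 2)
      else some (false, PySem.Dict.getD P fast 0, steps + 1)
    else some (false, fast, steps)

-- phase 2 of Source B: 'while p != q' walk recovering the tail length mu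
def findMu (P : PySem.Dict Int Int) : Nat → Int → Int → Nat → Option (Int × Nat)
  | 0, _, _, _ => none
  | n + 1, p, q, mu =>
    if p == q then some (p, mu)
    else findMu P n (PySem.Dict.getD P p 0) (PySem.Dict.getD P q 0) (mu + 1)

-- phase 3 of Source B: 'while q != p' walk recovering the cycle length lam
def findLam (P : PySem.Dict Int Int) : Nat → Int → Int → Nat → Option Nat
  | 0, _, _, _ => none
  | n + 1, p, q, lam =>
    if q == p then some lam
    else findLam P n p (PySem.Dict.getD P q 0) (lam + 1)

-- the final 'for _ in range(total)' name scan of Source B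
def bScan (P : PySem.Dict Int Int) (L : PySem.Dict Int String) : Nat → Int → String
  | 0, _ => "Unknown"
  | n + 1, cur =>
    if PySem.Str.lower (PySem.Dict.getD L cur "") ≠ "" then
      PySem.Str.lower (PySem.Dict.getD L cur "")
    else bScan P L n (PySem.Dict.getD P cur cur)

def infer_blast_name_alt (taxid : Int) (parent : List (Int × Int)) (lookup : List (Int × String)) : String :=
  match floyd1 (PySem.Dict.ofList parent) ((PySem.Dict.ofList parent).size + 2) taxid taxid 0 with
  | none => "Unknown"
  | some (cyclic, fast, steps) =>
    if cyclic then
      match findMu (PySem.Dict.ofList parent) ((PySem.Dict.ofList parent).size + 2) taxid fast 0 with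
      | none => "Unknown"
      | some (p, mu) =>
        match findLam (PySem.Dict.ofList parent) ((PySem.Dict.ofList parent).size + 2) p
            (PySem.Dict.getD (PySem.Dict.ofList parent) p 0) 1 with
        | none => "Unknown"
        | some lam => bScan (PySem.Dict.ofList parent) (PySem.Dict.ofList lookup) (mu + lam) taxid
    else bScan (PySem.Dict.ofList parent) (PySem.Dict.ofList lookup) (steps + 1) taxid

-- ===== PRECONDITION & SPEC =====
def Spec_infer_blast_name (taxid : Int) (parent : List (Int × Int)) (lookup : List (Int × String)) (out : String) : Prop := out = infer_blast_name_alt taxid parent lookup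
instance (taxid : Int) (parent : List (Int × Int)) (lookup : List (Int × String)) (out : String) : Decidable (Spec_infer_blast_name taxid parent lookup out) := by unfold Spec_infer_blast_name; infer_instance

-- ===== CLAIM (what is proved, stated in full; the proofs are below) =====
def Claim_equal_infer_blast_name : Prop := ∀ (taxid : Int) (parent : List (Int × Int)) (lookup : List (Int × String)), Dom_infer_blast_name taxid parent lookup → Spec_infer_blast_name taxid parent lookup (infer_blast_name taxid parent lookup)

-- ===== LEMMAS AND PROOFS =====

-- k-th node of the parent chain (the value both loops' cursors hold after k steps)
def pv_itf (P : PySem.Dict Int Int) (t : Int) : Nat → Int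
  | 0 => t
  | k + 1 => PySem.Dict.getD P (pv_itf P t k) 0

-- common reference value: first non-empty lowered name among chain nodes k, k+1, …, k+m-1
def specScan (P : PySem.Dict Int Int) (L : PySem.Dict Int String) (t : Int) : Nat → Nat → String
  | _, 0 => "Unknown"
  | k, m + 1 =>
    if PySem.Str.lower (PySem.Dict.getD L (pv_itf P t k) "") ≠ "" then
      PySem.Str.lower (PySem.Dict.getD L (pv_itf P t k) "")
    else specScan P L t (k + 1) m

theorem pv_getD_irrel (P : PySem.Dict Int Int) (x : Int) (h : P.contains x = true) (v w : Int) :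
    PySem.Dict.getD P x v = PySem.Dict.getD P x w := by
  rw [PySem.Dict.getD_eq_get?_getD, PySem.Dict.getD_eq_get?_getD]
  rw [PySem.Dict.contains_eq_isSome_get?] at h
  cases hg : P.get? x with
  | none => rw [hg] at h; simp at h
  | some y => simp

theorem pv_set_add (S : PySem.Set Int) (c : Int) (h : c ∉ S) : PySem.Set.add S c = S ++ [c] := by
  simp [PySem.Set.add, PySem.Set.contains]
  intro h'
  exact absurd h' h

theorem pv_card_bound (P : PySem.Dict Int Int) (t : Int) (n : Nat)
    (hk : ∀ k, k < n → P.contains (pv_itf P t k) = true)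
    (hinj : ∀ i j, i < n → j < n → pv_itf P t i = pv_itf P t j → i = j) : n ≤ P.size := by
  have hnd : ((List.range n).map (pv_itf P t)).Nodup := by
    refine List.Nodup.map_on ?_ List.nodup_range
    intro i hi j hj h
    exact hinj i j (List.mem_range.1 hi) (List.mem_range.1 hj) h
  have hsub : ((List.range n).map (pv_itf P t)) ⊆ P.keys := by
    intro x hx
    obtain ⟨k, hk', rfl⟩ := List.mem_map.1 hx
    exact (PySem.Dict.contains_iff_mem_keys P _).1 (hk k (List.mem_range.1 hk'))
  have hlen := (List.subperm_of_subset hnd hsub).length_le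
  simp only [List.length_map, List.length_range] at hlen
  have hkeys : P.keys.length = P.size := by simp [PySem.Dict.keys, PySem.Dict.size]
  omega

-- ---- cycle structure: tail length mu, cycle length lam, hper : itf (mu+lam) = itf mu ----

theorem pv_cyc_per (P : PySem.Dict Int Int) (t : Int) (mu lam : Nat)
    (hper : pv_itf P t (mu + lam) = pv_itf P t mu) :
    ∀ k, mu ≤ k → pv_itf P t (k + lam) = pv_itf P t k := by
  intro k hk
  induction k, hk using Nat.le_induction with
  | base => exact hper
  | succ n hn ih =>
    have h1 : n + 1 + lam = (n + lam) + 1 := by omega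
    rw [h1]
    show PySem.Dict.getD P (pv_itf P t (n + lam)) 0 = PySem.Dict.getD P (pv_itf P t n) 0
    rw [ih]

theorem pv_cyc_per_dvd (P : PySem.Dict Int Int) (t : Int) (mu lam : Nat)
    (hper : pv_itf P t (mu + lam) = pv_itf P t mu) :
    ∀ k d, mu ≤ k → lam ∣ d → pv_itf P t (k + d) = pv_itf P t k := by
  intro k d hk hd
  obtain ⟨c, rfl⟩ := hd
  induction c with
  | zero => simp
  | succ c ih =>
    have h1 : k + lam * (c + 1) = (k + lam * c) + lam := by ring
    rw [h1, pv_cyc_per P t mu lam hper _ (le_trans hk (Nat.le_add_right _ _)), ih]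

theorem pv_cyc_canon (P : PySem.Dict Int Int) (t : Int) (mu lam : Nat) (hlam : 0 < lam)
    (hper : pv_itf P t (mu + lam) = pv_itf P t mu) :
    ∀ k, mu ≤ k → pv_itf P t k = pv_itf P t (mu + (k - mu) % lam) := by
  intro k hk
  have hd := Nat.div_add_mod (k - mu) lam
  have h1 : k = (mu + (k - mu) % lam) + lam * ((k - mu) / lam) := by omega
  conv_lhs => rw [h1]
  exact pv_cyc_per_dvd P t mu lam hper _ _ (Nat.le_add_right _ _) ⟨_, rfl⟩

theorem pv_cyc_keys (P : PySem.Dict Int Int) (t : Int) (mu lam : Nat) (hlam : 0 < lam)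
    (hper : pv_itf P t (mu + lam) = pv_itf P t mu)
    (hkeys : ∀ k, k < mu + lam → P.contains (pv_itf P t k) = true) :
    ∀ k, P.contains (pv_itf P t k) = true := by
  intro k
  by_cases hk : k < mu + lam
  · exact hkeys k hk
  · have hmk : mu ≤ k := by omega
    rw [pv_cyc_canon P t mu lam hlam hper k hmk]
    have := Nat.mod_lt (k - mu) hlam
    exact hkeys _ (by omega)

theorem pv_cyc_tail (P : PySem.Dict Int Int) (t : Int) (mu lam : Nat) (hlam : 0 < lam)
    (hper : pv_itf P t (mu + lam) = pv_itf P t mu)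
    (hinj : ∀ i j, i < mu + lam → j < mu + lam → pv_itf P t i = pv_itf P t j → i = j) :
    ∀ a b, a < mu → pv_itf P t a = pv_itf P t b → a = b := by
  intro a b ha heq
  by_cases hb : b < mu + lam
  · exact hinj a b (by omega) hb heq
  · have hbm : mu ≤ b := by omega
    have h2 := pv_cyc_canon P t mu lam hlam hper b hbm
    have hlt : mu + (b - mu) % lam < mu + lam := by
      have := Nat.mod_lt (b - mu) hlam; omega
    have h3 : a = mu + (b - mu) % lam := hinj a _ (by omega) hlt (heq.trans h2)
    omega

theorem pv_cyc_dvd (P : PySem.Dict Int Int) (t : Int) (mu lam : Nat) (hlam : 0 < lam)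
    (hper : pv_itf P t (mu + lam) = pv_itf P t mu)
    (hinj : ∀ i j, i < mu + lam → j < mu + lam → pv_itf P t i = pv_itf P t j → i = j) :
    ∀ a b, mu ≤ a → a ≤ b → pv_itf P t a = pv_itf P t b → lam ∣ (b - a) := by
  intro a b ha hab heq
  have ca := pv_cyc_canon P t mu lam hlam hper a ha
  have cb := pv_cyc_canon P t mu lam hlam hper b (le_trans ha hab)
  have hlt1 : mu + (a - mu) % lam < mu + lam := by have := Nat.mod_lt (a - mu) hlam; omega
  have hlt2 : mu + (b - mu) % lam < mu + lam := by have := Nat.mod_lt (b - mu) hlam; omega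
  have he : mu + (a - mu) % lam = mu + (b - mu) % lam :=
    hinj _ _ hlt1 hlt2 (ca.symm.trans (heq.trans cb))
  have hmod : (a - mu) % lam = (b - mu) % lam := by omega
  have hdvd : lam ∣ ((b - mu) - (a - mu)) := (Nat.modEq_iff_dvd' (by omega)).1 hmod
  have h4 : (b - mu) - (a - mu) = b - a := by omega
  rwa [h4] at hdvd

theorem pv_meet_fwd (P : PySem.Dict Int Int) (t : Int) (mu lam : Nat) (hlam : 0 < lam)
    (hper : pv_itf P t (mu + lam) = pv_itf P t mu)
    (hinj : ∀ i j, i < mu + lam → j < mu + lam → pv_itf P t i = pv_itf P t j → i = j)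
    (i : Nat) (hi : 1 ≤ i) (heq : pv_itf P t i = pv_itf P t (2 * i)) : mu ≤ i ∧ lam ∣ i := by
  by_cases him : i < mu
  · have h := pv_cyc_tail P t mu lam hlam hper hinj i (2 * i) him heq
    omega
  · have hmi : mu ≤ i := by omega
    have hd := pv_cyc_dvd P t mu lam hlam hper hinj i (2 * i) hmi (by omega) heq
    have h2 : 2 * i - i = i := by omega
    exact ⟨hmi, h2 ▸ hd⟩

theorem pv_meet_rev (P : PySem.Dict Int Int) (t : Int) (mu lam : Nat)
    (hper : pv_itf P t (mu + lam) = pv_itf P t mu)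
    (i : Nat) (hmi : mu ≤ i) (hd : lam ∣ i) : pv_itf P t (2 * i) = pv_itf P t i := by
  have h1 : 2 * i = i + i := by omega
  rw [h1]
  exact pv_cyc_per_dvd P t mu lam hper i i hmi hd

-- ---- the four loops of Source B compute what they should ----

theorem pv_floyd_cyc (P : PySem.Dict Int Int) (t : Int) (mu lam istar : Nat) (hlam : 0 < lam)
    (hper : pv_itf P t (mu + lam) = pv_itf P t mu)
    (hinj : ∀ i j, i < mu + lam → j < mu + lam → pv_itf P t i = pv_itf P t j → i = j)
    (hkeys : ∀ k, k < mu + lam → P.contains (pv_itf P t k) = true)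
    (hi1 : 1 ≤ istar) (him : mu ≤ istar) (hidvd : lam ∣ istar)
    (hmin : ∀ i, 1 ≤ i → mu ≤ i → lam ∣ i → istar ≤ i) :
    ∀ n j, j < istar → istar - j ≤ n →
      floyd1 P n (pv_itf P t j) (pv_itf P t (2 * j)) (2 * j) =
        some (true, pv_itf P t istar, 2 * istar) := by
  intro n
  induction n with
  | zero => intro j h1 h2; omega
  | succ n ih =>
    intro j hj hn
    have hallk := pv_cyc_keys P t mu lam hlam hper hkeys
    have hc1 : P.contains (pv_itf P t (2 * j)) = true := hallk _
    have e1 : PySem.Dict.getD P (pv_itf P t (2 * j)) 0 = pv_itf P t (2 * j + 1) := rfl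
    have hc2 : P.contains (pv_itf P t (2 * j + 1)) = true := hallk _
    have e2 : PySem.Dict.getD P (pv_itf P t (2 * j + 1)) 0 = pv_itf P t (2 * j + 2) := rfl
    have e3 : PySem.Dict.getD P (pv_itf P t j) 0 = pv_itf P t (j + 1) := rfl
    rw [floyd1, if_pos hc1, e1, if_pos hc2, e2, e3]
    by_cases heq : pv_itf P t (j + 1) = pv_itf P t (2 * j + 2)
    · have hbeq : (pv_itf P t (j + 1) == pv_itf P t (2 * j + 2)) = true := beq_iff_eq.2 heq
      rw [if_pos hbeq]
      have h2e : 2 * (j + 1) = 2 * j + 2 := by omega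
      have hmeet := pv_meet_fwd P t mu lam hlam hper hinj (j + 1) (by omega)
        (by rw [h2e]; exact heq)
      have hji : istar = j + 1 :=
        le_antisymm (hmin (j + 1) (by omega) hmeet.1 hmeet.2) (by omega)
      subst hji
      have hv : pv_itf P t (2 * j + 2) = pv_itf P t (j + 1) := heq.symm
      rw [hv]
      have hs : 2 * j + 2 = 2 * (j + 1) := by omega
      rw [hs]
    · have hbeq : (pv_itf P t (j + 1) == pv_itf P t (2 * j + 2)) = false := by
        simp [heq]
      rw [hbeq]
      simp only [Bool.false_eq_true, if_false]
      have hne : j + 1 ≠ istar := by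
        intro h
        apply heq
        have h2e : 2 * (j + 1) = 2 * j + 2 := by omega
        have hrev := pv_meet_rev P t mu lam hper istar him hidvd
        rw [← h] at hrev
        rw [← h2e]
        exact hrev.symm
      have hjl : j + 1 < istar := by omega
      have h2e : 2 * j + 2 = 2 * (j + 1) := by omega
      rw [h2e]
      exact ih (j + 1) hjl (by omega)

theorem pv_floyd_acyc (P : PySem.Dict Int Int) (t : Int) (N : Nat)
    (hkeys : ∀ k, k < N → P.contains (pv_itf P t k) = true)
    (hend : P.contains (pv_itf P t N) = false)
    (hinj : ∀ i j, i ≤ N → j ≤ N → pv_itf P t i = pv_itf P t j → i = j) :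
    ∀ n j, 2 * j ≤ N → N < 2 * j + 2 * n →
      floyd1 P n (pv_itf P t j) (pv_itf P t (2 * j)) (2 * j) = some (false, pv_itf P t N, N) := by
  intro n
  induction n with
  | zero => intro j h1 h2; omega
  | succ n ih =>
    intro j hj hn
    by_cases h0 : 2 * j = N
    · rw [floyd1]
      rw [h0, hend]
      simp
    · have hc1 : P.contains (pv_itf P t (2 * j)) = true := hkeys _ (by omega)
      have e1 : PySem.Dict.getD P (pv_itf P t (2 * j)) 0 = pv_itf P t (2 * j + 1) := rfl
      rw [floyd1, if_pos hc1, e1]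
      by_cases h1 : 2 * j + 1 = N
      · rw [h1, hend]
        simp
      · have hc2 : P.contains (pv_itf P t (2 * j + 1)) = true := hkeys _ (by omega)
        have e2 : PySem.Dict.getD P (pv_itf P t (2 * j + 1)) 0 = pv_itf P t (2 * j + 2) := rfl
        have e3 : PySem.Dict.getD P (pv_itf P t j) 0 = pv_itf P t (j + 1) := rfl
        rw [if_pos hc2, e2, e3]
        have hne : pv_itf P t (j + 1) ≠ pv_itf P t (2 * j + 2) := by
          intro h
          have := hinj (j + 1) (2 * j + 2) (by omega) (by omega) h
          omega
        have hbeq : (pv_itf P t (j + 1) == pv_itf P t (2 * j + 2)) = false := by simp [hne]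
        rw [hbeq]
        simp only [Bool.false_eq_true, if_false]
        have h2e : 2 * j + 2 = 2 * (j + 1) := by omega
        rw [h2e]
        exact ih (j + 1) (by omega) (by omega)

theorem pv_findMu_spec (P : PySem.Dict Int Int) (t : Int) (mu lam istar : Nat) (hlam : 0 < lam)
    (hper : pv_itf P t (mu + lam) = pv_itf P t mu)
    (hinj : ∀ i j, i < mu + lam → j < mu + lam → pv_itf P t i = pv_itf P t j → i = j)
    (hi1 : 1 ≤ istar) (hidvd : lam ∣ istar) :
    ∀ n k, k ≤ mu → mu + 1 - k ≤ n →
      findMu P n (pv_itf P t k) (pv_itf P t (istar + k)) k = some (pv_itf P t mu, mu) := by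
  intro n
  induction n with
  | zero => intro k h1 h2; omega
  | succ n ih =>
    intro k hk hn
    by_cases heq : pv_itf P t k = pv_itf P t (istar + k)
    · have hkm : k = mu := by
        by_cases hlt : k < mu
        · have := pv_cyc_tail P t mu lam hlam hper hinj k (istar + k) hlt heq
          omega
        · omega
      subst hkm
      rw [findMu, if_pos (beq_iff_eq.2 heq)]
    · have hklt : k < mu := by
        rcases Nat.lt_or_ge k mu with h | h
        · exact h
        · exfalso
          have hkm : k = mu := by omega
          apply heq
          rw [hkm]
          have h1 : mu + istar = istar + mu := by omega
          have h2 := pv_cyc_per_dvd P t mu lam hper mu istar (le_refl _) hidvd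
          rw [h1] at h2
          exact h2.symm
      have hbeq : (pv_itf P t k == pv_itf P t (istar + k)) = false := by simp [heq]
      rw [findMu, hbeq]
      simp only [Bool.false_eq_true, if_false]
      have e1 : PySem.Dict.getD P (pv_itf P t k) 0 = pv_itf P t (k + 1) := rfl
      have e2 : PySem.Dict.getD P (pv_itf P t (istar + k)) 0 = pv_itf P t (istar + (k + 1)) := rfl
      rw [e1, e2]
      exact ih (k + 1) (by omega) (by omega)

theorem pv_findLam_spec (P : PySem.Dict Int Int) (t : Int) (mu lam : Nat) (hlam : 0 < lam)
    (hper : pv_itf P t (mu + lam) = pv_itf P t mu)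
    (hinj : ∀ i j, i < mu + lam → j < mu + lam → pv_itf P t i = pv_itf P t j → i = j) :
    ∀ n j, 1 ≤ j → j ≤ lam → lam + 1 - j ≤ n →
      findLam P n (pv_itf P t mu) (pv_itf P t (mu + j)) j = some lam := by
  intro n
  induction n with
  | zero => intro j h1 h2 h3; omega
  | succ n ih =>
    intro j hj1 hjl hn
    by_cases heq : pv_itf P t (mu + j) = pv_itf P t mu
    · have hd := pv_cyc_dvd P t mu lam hlam hper hinj mu (mu + j) (le_refl _) (by omega) heq.symm
      have hd2 : lam ∣ j := by
        have h1 : mu + j - mu = j := by omega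
        rwa [h1] at hd
      have hjlam : j = lam := le_antisymm hjl (Nat.le_of_dvd (by omega) hd2)
      subst hjlam
      rw [findLam, if_pos (beq_iff_eq.2 heq)]
    · have hjlt : j < lam := by
        rcases Nat.lt_or_ge j lam with h | h
        · exact h
        · exfalso
          have hje : j = lam := by omega
          apply heq
          rw [hje]
          exact pv_cyc_per P t mu lam hper mu (le_refl _)
      have hbeq : (pv_itf P t (mu + j) == pv_itf P t mu) = false := by simp [heq]
      rw [findLam, hbeq]
      simp only [Bool.false_eq_true, if_false]
      have e1 : PySem.Dict.getD P (pv_itf P t (mu + j)) 0 = pv_itf P t (mu + (j + 1)) := rfl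
      rw [e1]
      exact ih (j + 1) (by omega) hjlt (by omega)

theorem pv_bScan_spec (P : PySem.Dict Int Int) (L : PySem.Dict Int String) (t : Int) :
    ∀ m k, (∀ j, j + 1 < m → P.contains (pv_itf P t (k + j)) = true) →
      bScan P L m (pv_itf P t k) = specScan P L t k m := by
  intro m
  induction m with
  | zero => intro k _; rfl
  | succ m ih =>
    intro k hkey
    rw [bScan, specScan]
    by_cases hnm : PySem.Str.lower (PySem.Dict.getD L (pv_itf P t k) "") ≠ ""
    · rw [if_pos hnm, if_pos hnm]
    · rw [if_neg hnm, if_neg hnm]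
      cases m with
      | zero => rfl
      | succ m' =>
        have hck : P.contains (pv_itf P t k) = true := by
          have := hkey 0 (by omega)
          simpa using this
        have e1 : PySem.Dict.getD P (pv_itf P t k) (pv_itf P t k) = pv_itf P t (k + 1) := by
          rw [pv_getD_irrel P _ hck _ 0]; rfl
        rw [e1]
        apply ih
        intro j hjm
        have hjj := hkey (j + 1) (by omega)
        have h1 : k + (j + 1) = k + 1 + j := by omega
        rwa [h1] at hjj

-- ---- A's loop equals the same reference value ----

theorem pv_aLoop_cyc (P : PySem.Dict Int Int) (L : PySem.Dict Int String) (t : Int)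
    (mu lam : Nat) (hlam : 0 < lam)
    (hper : pv_itf P t (mu + lam) = pv_itf P t mu)
    (hinj : ∀ i j, i < mu + lam → j < mu + lam → pv_itf P t i = pv_itf P t j → i = j)
    (hkeys : ∀ k, k < mu + lam → P.contains (pv_itf P t k) = true) :
    ∀ m k, k + m = mu + lam →
      aLoop P L ((List.range k).map (pv_itf P t)) (pv_itf P t k) = specScan P L t k m := by
  intro m
  induction m with
  | zero =>
    intro k hk
    have hmem : pv_itf P t k ∈ (List.range k).map (pv_itf P t) := by
      refine List.mem_map.2 ⟨mu, List.mem_range.2 (by omega), ?_⟩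
      have hk' : k = mu + lam := by omega
      subst hk'
      exact hper.symm
    rw [aLoop]
    simp only [hmem, dite_true]
    rfl
  | succ m ih =>
    intro k hk
    have hnotin : pv_itf P t k ∉ (List.range k).map (pv_itf P t) := by
      intro hmem
      obtain ⟨i, hi, hieq⟩ := List.mem_map.1 hmem
      have hik := hinj i k (by have := List.mem_range.1 hi; omega) (by omega) hieq
      have := List.mem_range.1 hi
      omega
    rw [aLoop]
    simp only [hnotin, dite_false]
    rw [specScan]
    by_cases hnm : PySem.Str.lower (PySem.Dict.getD L (pv_itf P t k) "") ≠ ""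
    · rw [if_pos hnm, if_pos hnm]
    · rw [if_neg hnm, if_neg hnm]
      have hck : P.contains (pv_itf P t k) = true := hkeys k (by omega)
      simp only [hck, dite_true]
      have hadd := pv_set_add ((List.range k).map (pv_itf P t)) (pv_itf P t k) hnotin
      have hrng : ((List.range k).map (pv_itf P t)) ++ [pv_itf P t k] =
          (List.range (k + 1)).map (pv_itf P t) := by
        rw [List.range_succ, List.map_append]
        rfl
      have e1 : PySem.Dict.getD P (pv_itf P t k) 0 = pv_itf P t (k + 1) := rfl
      rw [hadd, hrng, e1]
      exact ih (k + 1) (by omega)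

theorem pv_aLoop_acyc (P : PySem.Dict Int Int) (L : PySem.Dict Int String) (t : Int) (N : Nat)
    (hkeys : ∀ k, k < N → P.contains (pv_itf P t k) = true)
    (hend : P.contains (pv_itf P t N) = false)
    (hinj : ∀ i j, i ≤ N → j ≤ N → pv_itf P t i = pv_itf P t j → i = j) :
    ∀ m k, k + m = N + 1 → 1 ≤ m →
      aLoop P L ((List.range k).map (pv_itf P t)) (pv_itf P t k) = specScan P L t k m := by
  intro m
  induction m with
  | zero => intro k h1 h2; omega
  | succ m ih =>
    intro k hk _
    have hnotin : pv_itf P t k ∉ (List.range k).map (pv_itf P t) := by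
      intro hmem
      obtain ⟨i, hi, hieq⟩ := List.mem_map.1 hmem
      have hik := hinj i k (by have := List.mem_range.1 hi; omega) (by omega) hieq
      have := List.mem_range.1 hi
      omega
    rw [aLoop]
    simp only [hnotin, dite_false]
    rw [specScan]
    by_cases hnm : PySem.Str.lower (PySem.Dict.getD L (pv_itf P t k) "") ≠ ""
    · rw [if_pos hnm, if_pos hnm]
    · rw [if_neg hnm, if_neg hnm]
      by_cases hkN : k = N
      · have hendk : P.contains (pv_itf P t k) = false := by rw [hkN]; exact hend
        rw [dif_neg (by simp [hendk])]
        have hm0 : m = 0 := by omega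
        rw [hm0]
        rfl
      · have hck : P.contains (pv_itf P t k) = true := hkeys k (by omega)
        simp only [hck, dite_true]
        have hadd := pv_set_add ((List.range k).map (pv_itf P t)) (pv_itf P t k) hnotin
        have hrng : ((List.range k).map (pv_itf P t)) ++ [pv_itf P t k] =
            (List.range (k + 1)).map (pv_itf P t) := by
          rw [List.range_succ, List.map_append]
          rfl
        have e1 : PySem.Dict.getD P (pv_itf P t k) 0 = pv_itf P t (k + 1) := rfl
        rw [hadd, hrng, e1]
        exact ih (k + 1) (by omega) (by omega)

-- ===== VERDICT (by name: the statement is the Claim_ definition above) =====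
theorem infer_blast_name_spec : Claim_equal_infer_blast_name := by
  intro taxid parent lookup _
  unfold Spec_infer_blast_name
  classical
  set P := PySem.Dict.ofList parent with hP
  set L := PySem.Dict.ofList lookup with hL
  have hQex : ∃ n, P.contains (pv_itf P taxid n) = false ∨
      ∃ i, i < n ∧ pv_itf P taxid i = pv_itf P taxid n := by
    by_contra hno
    push_neg at hno
    have hinj : ∀ i j, pv_itf P taxid i = pv_itf P taxid j → i = j := by
      intro i j h
      rcases lt_trichotomy i j with hlt | heq | hgt
      · exact absurd h ((hno j).2 i hlt)
      · exact heq
      · exact absurd h.symm ((hno i).2 j hgt)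
    have hcb := pv_card_bound P taxid (P.size + 1)
      (fun k _ => by
        have hnk := (hno k).1
        cases hcc : P.contains (pv_itf P taxid k) with
        | false => exact absurd hcc hnk
        | true => rfl)
      (fun i j _ _ h => hinj i j h)
    omega
  set N := Nat.find hQex with hNdef
  have hQN := Nat.find_spec hQex
  have hQmin : ∀ m, m < N → ¬(P.contains (pv_itf P taxid m) = false ∨
      ∃ i, i < m ∧ pv_itf P taxid i = pv_itf P taxid m) := fun m hm => Nat.find_min hQex hm
  have hkeysN : ∀ k, k < N → P.contains (pv_itf P taxid k) = true := by
    intro k hk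
    have h := hQmin k hk
    push_neg at h
    cases hcc : P.contains (pv_itf P taxid k) with
    | false => exact absurd hcc h.1
    | true => rfl
  have hinjN : ∀ i j, i < N → j < N → pv_itf P taxid i = pv_itf P taxid j → i = j := by
    intro i j hi hj h
    rcases lt_trichotomy i j with hlt | heq | hgt
    · exfalso
      have hj' := hQmin j hj
      push_neg at hj'
      exact hj'.2 i hlt h
    · exact heq
    · exfalso
      have hi' := hQmin i hi
      push_neg at hi'
      exact hi'.2 j hgt h.symm
  have hNsize : N ≤ P.size := pv_card_bound P taxid N hkeysN hinjN
  by_cases hc : ∃ i, i < N ∧ pv_itf P taxid i = pv_itf P taxid N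
  · -- the chain runs into a cycle
    obtain ⟨r, hrN, hreq⟩ := hc
    have hlam : 0 < N - r := by omega
    have hper : pv_itf P taxid (r + (N - r)) = pv_itf P taxid r := by
      have hs : r + (N - r) = N := by omega
      rw [hs]; exact hreq.symm
    have hinj : ∀ i j, i < r + (N - r) → j < r + (N - r) →
        pv_itf P taxid i = pv_itf P taxid j → i = j := by
      have hs : r + (N - r) = N := by omega
      rw [hs]; exact hinjN
    have hkeys : ∀ k, k < r + (N - r) → P.contains (pv_itf P taxid k) = true := by
      have hs : r + (N - r) = N := by omega
      rw [hs]; exact hkeysN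
    have hex : ∃ i, 1 ≤ i ∧ r ≤ i ∧ (N - r) ∣ i := by
      refine ⟨(r / (N - r) + 1) * (N - r), ?_, ?_, ⟨r / (N - r) + 1, by ring⟩⟩ <;>
      · have h1 := Nat.div_add_mod r (N - r)
        have h2 : r % (N - r) < N - r := Nat.mod_lt r hlam
        have h3 : r / (N - r) * (N - r) = (N - r) * (r / (N - r)) := Nat.mul_comm _ _
        rw [add_mul, one_mul]
        omega
    set istar := Nat.find hex with histardef
    obtain ⟨hi1, him, hidvd⟩ := Nat.find_spec hex
    have hmin : ∀ i, 1 ≤ i → r ≤ i → (N - r) ∣ i → istar ≤ i := by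
      intro i h1 h2 h3
      exact Nat.find_min' hex ⟨h1, h2, h3⟩
    have hibound : istar ≤ N := by
      have hw : 1 ≤ (r / (N - r) + 1) * (N - r) ∧ r ≤ (r / (N - r) + 1) * (N - r) ∧
          (N - r) ∣ (r / (N - r) + 1) * (N - r) := by
        refine ⟨?_, ?_, ⟨r / (N - r) + 1, by ring⟩⟩ <;>
        · have h1 := Nat.div_add_mod r (N - r)
          have h2 : r % (N - r) < N - r := Nat.mod_lt r hlam
          have h3 : r / (N - r) * (N - r) = (N - r) * (r / (N - r)) := Nat.mul_comm _ _
          rw [add_mul, one_mul]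
          omega
      have hle := Nat.find_min' hex hw
      have h1 := Nat.div_add_mod r (N - r)
      have h2 : r % (N - r) < N - r := Nat.mod_lt r hlam
      have h3 : r / (N - r) * (N - r) = (N - r) * (r / (N - r)) := Nat.mul_comm _ _
      rw [add_mul, one_mul] at hle
      omega
    have hfl : floyd1 P (P.size + 2) taxid taxid 0 =
        some (true, pv_itf P taxid istar, 2 * istar) := by
      have hh := pv_floyd_cyc P taxid r (N - r) istar hlam hper hinj hkeys hi1 him hidvd hmin
        (P.size + 2) 0 (by omega) (by omega)
      simpa [pv_itf] using hh
    have hfm : findMu P (P.size + 2) taxid (pv_itf P taxid istar) 0 =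
        some (pv_itf P taxid r, r) := by
      have hh := pv_findMu_spec P taxid r (N - r) istar hlam hper hinj hi1 hidvd
        (P.size + 2) 0 (by omega) (by omega)
      simpa [pv_itf] using hh
    have hflam : findLam P (P.size + 2) (pv_itf P taxid r)
        (PySem.Dict.getD P (pv_itf P taxid r) 0) 1 = some (N - r) := by
      have hh := pv_findLam_spec P taxid r (N - r) hlam hper hinj
        (P.size + 2) 1 (by omega) (by omega) (by omega)
      have e1 : PySem.Dict.getD P (pv_itf P taxid r) 0 = pv_itf P taxid (r + 1) := rfl
      rw [e1]
      exact hh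
    have hB : infer_blast_name_alt taxid parent lookup = specScan P L taxid 0 (r + (N - r)) := by
      unfold infer_blast_name_alt
      rw [← hP, ← hL]
      simp only [hfl, hfm, hflam, if_true]
      have hh := pv_bScan_spec P L taxid (r + (N - r)) 0
        (fun j hj => by rw [Nat.zero_add]; exact hkeys j (by omega))
      simpa [pv_itf] using hh
    have hA : infer_blast_name taxid parent lookup = specScan P L taxid 0 (r + (N - r)) := by
      unfold infer_blast_name
      rw [← hP, ← hL]
      have hh := pv_aLoop_cyc P L taxid r (N - r) hlam hper hinj hkeys (r + (N - r)) 0 (by omega)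
      simpa [PySem.Set.empty, pv_itf] using hh
    rw [hA, hB]
  · -- the chain terminates
    have hend : P.contains (pv_itf P taxid N) = false := by
      rcases hQN with h | h
      · exact h
      · exact absurd h hc
    have hinjle : ∀ i j, i ≤ N → j ≤ N → pv_itf P taxid i = pv_itf P taxid j → i = j := by
      intro i j hi hj h
      rcases Nat.lt_or_ge i N with hiN | hiN
      · rcases Nat.lt_or_ge j N with hjN | hjN
        · exact hinjN i j hiN hjN h
        · exfalso
          have hjN' : j = N := by omega
          subst hjN'
          exact hc ⟨i, hiN, h⟩
      · have hiN' : i = N := by omega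
        subst hiN'
        rcases Nat.lt_or_ge j N with hjN | hjN
        · exact absurd ⟨j, hjN, h.symm⟩ hc
        · omega
    have hfl : floyd1 P (P.size + 2) taxid taxid 0 = some (false, pv_itf P taxid N, N) := by
      have hh := pv_floyd_acyc P taxid N hkeysN hend hinjle (P.size + 2) 0 (by omega) (by omega)
      simpa using hh
    have hB : infer_blast_name_alt taxid parent lookup = specScan P L taxid 0 (N + 1) := by
      unfold infer_blast_name_alt
      rw [← hP, ← hL]
      simp only [hfl, Bool.false_eq_true, if_false]
      have hh := pv_bScan_spec P L taxid (N + 1) 0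
        (fun j hj => by rw [Nat.zero_add]; exact hkeysN j (by omega))
      simpa [pv_itf] using hh
    have hA : infer_blast_name taxid parent lookup = specScan P L taxid 0 (N + 1) := by
      unfold infer_blast_name
      rw [← hP, ← hL]
      have hh := pv_aLoop_acyc P L taxid N hkeysN hend hinjle (N + 1) 0 (by omega) (by omega)
      simpa [PySem.Set.empty, pv_itf] using hh
    rw [hA, hB]
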